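-- pv_equiv track=rewrite | github.com/michalkova-a/reports_publish | src/reports-publish/html_file_with_links.py | str_to_human
-- ===== SOURCE A (Python) =====
-- def str_to_human(x: str) -> str:
--     """Takes string as is usually used in filenames or code
--     (lowercase, words separated by underscore etc.)
--     and transforms it to how humans would write it
--     (spaces, capital letters)"""
--     res = (
--         x
--         .replace("-", "_")
--         .split("_")
--     )
--     res = [word.capitalize() for word in res]
--
--     return " ".join(res)
-- ===== SOURCE B (Python) =====
-- def str_to_human(x: str) -> str:
--     """Single pass over x as a character stream: separators become spaces,
--     the first letter after a word start is uppercased, the rest lowercased."""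
--     out = []
--     at_word_start = True
--     for c in x:
--         if c == '-' or c == '_':
--             out.append(' ')
--             at_word_start = True
--         elif at_word_start:
--             out.append(c.upper())
--             at_word_start = False
--         else:
--             out.append(c.lower())
--     return ''.join(out)
-- ===== Notes on version B (the rewrite author's own statement) =====
-- stated objective: alternative
-- what changed: Replaces the replace/split/capitalize/join pipeline (four passes building intermediate strings and a word list) by a single character-stream scan with an at_word_start flag that emits the result directly.
import Mathlib
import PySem

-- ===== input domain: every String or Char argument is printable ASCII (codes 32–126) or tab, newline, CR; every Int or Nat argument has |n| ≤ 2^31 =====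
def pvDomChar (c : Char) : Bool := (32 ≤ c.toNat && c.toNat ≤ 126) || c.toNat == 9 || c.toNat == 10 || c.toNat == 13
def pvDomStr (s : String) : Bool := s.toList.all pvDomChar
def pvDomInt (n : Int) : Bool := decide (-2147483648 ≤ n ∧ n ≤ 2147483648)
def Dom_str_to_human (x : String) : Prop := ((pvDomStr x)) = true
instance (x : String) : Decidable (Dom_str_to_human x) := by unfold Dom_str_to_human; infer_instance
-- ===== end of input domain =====

-- B replaces A's replace/split/capitalize/join pipeline by a single character-stream
-- scan with an at-word-start flag; same return value on the ASCII domain.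


-- ===== PORT A =====
-- str.capitalize, ported by hand (PySem has no capitalize): first char upper, rest lower;
-- exact on the ASCII domain (titlecase = uppercase there).
def pyCapitalize (w : List Char) : List Char :=
  match w with
  | [] => []
  | c :: cs => PySem.Chars.upperChar c :: cs.map PySem.Chars.lowerChar

def str_to_human (x : String) : String :=
  let res := PySem.Chars.splitOn (PySem.Chars.replace x.toList ['-'] ['_']) ['_']
  String.ofList (PySem.Chars.join [' '] (res.map pyCapitalize))

-- ===== PORT B =====
def altGo : List Char → Bool → List Char
  | [], _ => []
  | c :: cs, atStart =>
    if c = '-' ∨ c = '_' then ' ' :: altGo cs true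
    else (if atStart then PySem.Chars.upperChar c else PySem.Chars.lowerChar c) :: altGo cs false

def str_to_human_alt (x : String) : String :=
  String.ofList (altGo x.toList true)

-- ===== PRECONDITION & SPEC =====
def Spec_str_to_human (x : String) (out : String) : Prop := out = str_to_human_alt x
instance (x : String) (out : String) : Decidable (Spec_str_to_human x out) := by unfold Spec_str_to_human; infer_instance

-- ===== CLAIM (what is proved, stated in full; the proofs are below) =====
def Claim_equal_str_to_human : Prop := ∀ (x : String), Dom_str_to_human x → Spec_str_to_human x (str_to_human x)

-- ===== LEMMAS AND PROOFS =====

-- substitution performed by x.replace("-","_"), characterwise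
def subChar (c : Char) : Char := if c = '-' then '_' else c

-- reference single-char split on '_'
def split1 : List Char → List (List Char)
  | [] => [[]]
  | c :: cs => if c = '_' then [] :: split1 cs else List.modifyHead (c :: ·) (split1 cs)

lemma split1_ne_nil (s : List Char) : split1 s ≠ [] := by
  induction s with
  | nil => simp [split1]
  | cons c cs ih =>
    simp only [split1]
    split
    · simp
    · cases h : split1 cs with
      | nil => exact absurd h ih
      | cons a t => simp [List.modifyHead]

lemma replace_go_char (fuel : Nat) :
    ∀ (s acc : List Char), s.length ≤ fuel →
      PySem.Chars.replace.go ['-'] ['_'] fuel s acc = acc.reverse ++ s.map subChar := by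
  induction fuel with
  | zero =>
    intro s acc h
    have : s = [] := List.eq_nil_of_length_eq_zero (Nat.le_zero.mp h)
    subst this
    simp [PySem.Chars.replace.go]
  | succ n ih =>
    intro s acc h
    cases s with
    | nil => simp [PySem.Chars.replace.go]
    | cons c t =>
      rw [PySem.Chars.replace.go]
      by_cases hc : c = '-'
      · subst hc
        have hp : List.isPrefixOf ['-'] ('-' :: t) = true := by
          simp [List.isPrefixOf]
        simp only [hp, if_pos]
        rw [ih _ _ (by simpa using Nat.le_of_succ_le_succ h)]
        simp [subChar, List.map_cons]
      · have hp : List.isPrefixOf ['-'] (c :: t) = false := by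
          simp [List.isPrefixOf]
          intro hcc; exact absurd hcc.symm hc
        simp only [hp, Bool.false_eq_true, if_neg, not_false_eq_true]
        rw [ih _ _ (by simpa using Nat.le_of_succ_le_succ h)]
        simp [subChar, hc]

lemma replace_char (s : List Char) :
    PySem.Chars.replace s ['-'] ['_'] = s.map subChar := by
  show (if List.isEmpty ['-'] = true then _ else PySem.Chars.replace.go ['-'] ['_'] s.length s []) = _
  rw [if_neg (by simp)]
  simpa using replace_go_char s.length s [] (le_refl _)

lemma splitOn_go_char (fuel : Nat) :
    ∀ (l cur : List Char) (acc2 : List (List Char)), l.length ≤ fuel →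
      PySem.Chars.splitOn.go ['_'] fuel l cur acc2 =
        acc2.reverse ++ List.modifyHead (cur.reverse ++ ·) (split1 l) := by
  induction fuel with
  | zero =>
    intro l cur acc2 h
    have : l = [] := List.eq_nil_of_length_eq_zero (Nat.le_zero.mp h)
    subst this
    simp [PySem.Chars.splitOn.go, split1]
  | succ n ih =>
    intro l cur acc2 h
    cases l with
    | nil => simp [PySem.Chars.splitOn.go, split1]
    | cons c t =>
      rw [PySem.Chars.splitOn.go]
      by_cases hc : c = '_'
      · subst hc
        have hp : List.isPrefixOf ['_'] ('_' :: t) = true := by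
          simp [List.isPrefixOf]
        simp only [hp, if_pos]
        rw [ih _ _ _ (by simpa using Nat.le_of_succ_le_succ h)]
        cases hs : split1 t with
        | nil => exact absurd hs (split1_ne_nil t)
        | cons a t' => simp [split1, hs, List.modifyHead]
      · have hp : List.isPrefixOf ['_'] (c :: t) = false := by
          simp [List.isPrefixOf]
          intro hcc; exact absurd hcc.symm hc
        simp only [hp, Bool.false_eq_true, if_neg, not_false_eq_true]
        rw [ih _ _ _ (by simpa using Nat.le_of_succ_le_succ h)]
        cases hs : split1 t with
        | nil => exact absurd hs (split1_ne_nil t)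
        | cons a t' => simp [split1, hs, hc, List.modifyHead]

lemma splitOn_char (s : List Char) :
    PySem.Chars.splitOn s ['_'] = split1 s := by
  show PySem.Chars.splitOn.go ['_'] (s.length + 1) s [] [] = _
  rw [splitOn_go_char (s.length + 1) s [] [] (Nat.le_succ _)]
  cases h : split1 s with
  | nil => exact absurd h (split1_ne_nil s)
  | cons a t => simp [List.modifyHead]

-- tail of the joined result: one space then the capitalized word, per remaining word
def tailJoin (ps : List (List Char)) : List Char :=
  ps.flatMap (fun p => ' ' :: pyCapitalize p)

lemma intercalate_cap (ls : List (List Char)) (l : List Char) :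
    PySem.Chars.join [' '] (pyCapitalize l :: ls.map pyCapitalize)
      = pyCapitalize l ++ tailJoin ls := by
  induction ls generalizing l with
  | nil => simp [PySem.Chars.join, List.intercalate, tailJoin]
  | cons a t ih =>
    have : PySem.Chars.join [' '] (pyCapitalize l :: pyCapitalize a :: t.map pyCapitalize)
        = pyCapitalize l ++ [' '] ++ PySem.Chars.join [' '] (pyCapitalize a :: t.map pyCapitalize) := by
      simp [PySem.Chars.join, List.intercalate, List.intersperse]
    simp only [List.map_cons, this, ih a]
    simp [tailJoin, List.flatMap_cons]

def capb (b : Bool) (w : List Char) : List Char :=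
  if b then pyCapitalize w else w.map PySem.Chars.lowerChar

lemma altGo_eq (s : List Char) (b : Bool) :
    altGo s b = capb b (split1 (s.map subChar)).headI
                  ++ tailJoin (split1 (s.map subChar)).tail := by
  induction s generalizing b with
  | nil => simp [altGo, split1, capb, pyCapitalize, tailJoin]
  | cons c cs ih =>
    by_cases hsep : c = '-' ∨ c = '_'
    · have hsub : subChar c = '_' := by
        rcases hsep with h | h <;> simp [subChar, h]
      simp only [altGo, if_pos hsep, List.map_cons, hsub, split1]
      cases h : split1 (cs.map subChar) with
      | nil => exact absurd h (split1_ne_nil _)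
      | cons a t =>
        rw [ih true]
        cases b <;> simp [h, capb, tailJoin, List.flatMap_cons, pyCapitalize]
    · have hsub : subChar c = c := by
        simp only [subChar, ite_eq_right_iff]
        intro hc; exact absurd (Or.inl hc) hsep
      have hne : ¬ c = '_' := fun hc => hsep (Or.inr hc)
      simp only [altGo, if_neg hsep, List.map_cons, hsub, split1, if_neg hne]
      cases h : split1 (cs.map subChar) with
      | nil => exact absurd h (split1_ne_nil _)
      | cons a t =>
        rw [ih false]
        simp [h, capb, pyCapitalize, List.modifyHead]
        cases b <;> simp

-- ===== VERDICT (by name: the statement is the Claim_ definition above) =====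
theorem str_to_human_spec : Claim_equal_str_to_human := by
  intro x _
  show str_to_human x = str_to_human_alt x
  unfold str_to_human str_to_human_alt
  rw [replace_char, splitOn_char, altGo_eq]
  cases h : split1 (x.toList.map subChar) with
  | nil => exact absurd h (split1_ne_nil _)
  | cons a t =>
    have hcapb : capb true a = pyCapitalize a := by simp [capb]
    simp only [List.map_cons, List.headI, List.tail, hcapb]
    rw [intercalate_cap]
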